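-- pv_equiv track=rewrite | github.com/DeepInside-Informatics/kco | kco_operator/events/generator.py | _is_problematic_value
-- ===== SOURCE A (Python) =====
-- def _is_problematic_value(value: str) -> bool:
--     """Check if a value indicates a problem."""
--     if not value:
--         return False
--
--     value_lower = str(value).lower()
--     problematic_keywords = [
--         "error", "failed", "failure", "unhealthy", "down",
--         "critical", "fatal", "exception", "timeout"
--     ]
--
--     return any(keyword in value_lower for keyword in problematic_keywords)
-- ===== SOURCE B (Python) =====
-- _KEYWORDS = ("error", "failed", "failure", "unhealthy", "down",
--              "critical", "fatal", "exception", "timeout")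
--
--
-- def _is_problematic_value(value: str) -> bool:
--     """Check if a value indicates a problem (position-major single scan)."""
--     if not value:
--         return False
--     s = str(value).lower()
--     for i in range(len(s)):
--         if s.startswith(_KEYWORDS, i):
--             return True
--     return False
-- ===== Notes on version B (the rewrite author's own statement) =====
-- stated objective: alternative
-- what changed: Replaced the keyword-major loop that runs one full substring scan per keyword by a position-major single left-to-right scan that at each index tests str.startswith against the keyword tuple.
import Mathlib
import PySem

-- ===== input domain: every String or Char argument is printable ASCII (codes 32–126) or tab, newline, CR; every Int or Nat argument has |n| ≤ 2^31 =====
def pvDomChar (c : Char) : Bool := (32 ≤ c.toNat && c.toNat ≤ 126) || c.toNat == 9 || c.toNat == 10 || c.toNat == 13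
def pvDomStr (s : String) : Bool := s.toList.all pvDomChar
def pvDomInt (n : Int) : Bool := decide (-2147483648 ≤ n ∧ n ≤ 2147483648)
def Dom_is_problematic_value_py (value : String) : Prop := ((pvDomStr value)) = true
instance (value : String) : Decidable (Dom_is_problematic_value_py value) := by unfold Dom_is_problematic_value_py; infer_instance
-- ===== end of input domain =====

-- B replaces the keyword-major any(kw in s) with a position-major single scan; alternative decomposition, not claimed faster.

-- ===== PORT A =====
def pvKeywords : List String :=
  ["error", "failed", "failure", "unhealthy", "down",
   "critical", "fatal", "exception", "timeout"]

def is_problematic_value_py (value : String) : Bool :=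
  if value == "" then false
  else
    let value_lower := PySem.Str.lower value
    pvKeywords.any (fun keyword => PySem.Str.isIn keyword value_lower)

-- ===== PORT B =====
def pvKeywordsB : List String :=
  ["error", "failed", "failure", "unhealthy", "down",
   "critical", "fatal", "exception", "timeout"]

-- the loop 'for i in range(len(s)): if s.startswith(_KEYWORDS, i)' walks the suffixes of s
def pvScan (l : List Char) : Bool :=
  match l with
  | [] => false
  | _ :: rest =>
      if pvKeywordsB.any (fun kw => PySem.Chars.startswith l kw.toList) then true
      else pvScan rest

def is_problematic_value_py_alt (value : String) : Bool :=
  if value == "" then false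
  else pvScan (PySem.Str.lower value).toList

-- ===== PRECONDITION & SPEC =====
def Spec_is_problematic_value_py (value : String) (out : Bool) : Prop := out = is_problematic_value_py_alt value
instance (value : String) (out : Bool) : Decidable (Spec_is_problematic_value_py value out) := by unfold Spec_is_problematic_value_py; infer_instance

-- ===== CLAIM (what is proved, stated in full; the proofs are below) =====
def Claim_equal_is_problematic_value_py : Prop := ∀ (value : String), Dom_is_problematic_value_py value → Spec_is_problematic_value_py value (is_problematic_value_py value)

-- ===== LEMMAS AND PROOFS =====

theorem pvScan_eq_any (l : List Char) :
    pvScan l = pvKeywordsB.any (fun kw => PySem.Chars.isIn kw.toList l) := by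
  induction l with
  | nil => decide
  | cons c rest ih =>
      rw [pvScan, ih]
      cases hb : pvKeywordsB.any (fun kw => PySem.Chars.startswith (c :: rest) kw.toList) with
      | true =>
          simp only [if_true]
          symm
          rw [List.any_eq_true] at hb ⊢
          obtain ⟨kw, hm, hsw⟩ := hb
          exact ⟨kw, hm, (PySem.Chars.isIn_iff_infix _ _).mpr
            (List.infix_cons_iff.mpr (Or.inl ((PySem.Chars.startswith_iff _ _).mp hsw)))⟩
      | false =>
          rw [if_neg (by simp)]
          rw [Bool.eq_iff_iff, List.any_eq_true, List.any_eq_true]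
          constructor
          · rintro ⟨kw, hm, hi⟩
            exact ⟨kw, hm, (PySem.Chars.isIn_iff_infix _ _).mpr
              (List.infix_cons_iff.mpr (Or.inr ((PySem.Chars.isIn_iff_infix _ _).mp hi)))⟩
          · rintro ⟨kw, hm, hi⟩
            rcases List.infix_cons_iff.mp ((PySem.Chars.isIn_iff_infix _ _).mp hi) with hp | hi'
            · have : pvKeywordsB.any (fun kw => PySem.Chars.startswith (c :: rest) kw.toList) = true :=
                List.any_eq_true.mpr ⟨kw, hm, (PySem.Chars.startswith_iff _ _).mpr hp⟩
              rw [hb] at this; exact absurd this (by simp)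
            · exact ⟨kw, hm, (PySem.Chars.isIn_iff_infix _ _).mpr hi'⟩

-- ===== VERDICT (by name: the statement is the Claim_ definition above) =====
theorem is_problematic_value_py_spec : Claim_equal_is_problematic_value_py := by
  intro value _
  unfold Spec_is_problematic_value_py is_problematic_value_py is_problematic_value_py_alt
  by_cases h : value == ""
  · simp [h]
  · simp only [h]
    rw [pvScan_eq_any]
    simp [pvKeywords, pvKeywordsB, PySem.Str.isIn]
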